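-- pv_equiv track=rewrite | github.com/adinashby-vanier-college/programming-in-science-assignment-1-LucaVendittelli | Assignment1.py | count_multiples_of_3
-- ===== SOURCE A (Python) =====
-- def count_multiples_of_3(limit):
--     # TODO: Implement this function
--     pass  # Replace with your code
--
--     result = []
--     num = 1
--     while num <= limit:
--         if num % 3 == 0:
--             result.append("Multiple of 3")
--         else:
--             result.append(str(num))
--         num += 1
--     return "\n".join(result)
-- ===== SOURCE B (Python) =====
-- def count_multiples_of_3(limit):
--     result = [str(n) for n in range(1, limit + 1)]
--     for i in range(2, limit, 3):
--         result[i] = "Multiple of 3"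
--     return "\n".join(result)
-- ===== Notes on version B (the rewrite author's own statement) =====
-- stated objective: alternative
-- what changed: Replaces the while loop with a per-element modulo branch by an unconditional list-comprehension fill of str(n) over range(1, limit+1) followed by a stride-3 overwrite pass that writes the label only at the indices of multiples of 3.
import Mathlib
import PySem

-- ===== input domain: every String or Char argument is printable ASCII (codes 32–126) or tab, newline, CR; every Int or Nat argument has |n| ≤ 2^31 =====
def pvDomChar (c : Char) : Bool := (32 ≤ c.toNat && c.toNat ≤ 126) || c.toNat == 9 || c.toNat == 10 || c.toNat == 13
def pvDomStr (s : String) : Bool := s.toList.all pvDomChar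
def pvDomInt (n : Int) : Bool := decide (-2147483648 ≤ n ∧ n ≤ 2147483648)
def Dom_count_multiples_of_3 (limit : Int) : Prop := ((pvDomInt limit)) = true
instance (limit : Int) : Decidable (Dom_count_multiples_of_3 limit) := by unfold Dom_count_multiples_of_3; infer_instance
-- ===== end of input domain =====

-- B replaces the single while loop with an inline modulo branch by an unconditional
-- fill of str(n) followed by a stride-3 overwrite pass over the multiples (alternative decomposition).

-- ===== PORT A =====
-- while num <= limit: append branch; num += 1
def pvA_loop (limit num : Int) (acc : List String) : List String :=
  if h : num ≤ limit then
    pvA_loop limit (num + 1)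
      (acc ++ [if PySem.Int.mod num 3 = 0 then "Multiple of 3" else PySem.Int.toStr num])
  else acc
termination_by (limit + 1 - num).toNat
decreasing_by omega

def count_multiples_of_3 (limit : Int) : String :=
  PySem.Str.join "\n" (pvA_loop limit 1 [])

-- ===== PORT B =====
-- result[i] = "Multiple of 3" with i from range(2, limit, 3): i is always a valid
-- non-negative index (2 ≤ i < limit = len(result)), so pySetD is exact here.
def count_multiples_of_3_alt (limit : Int) : String :=
  let result := (PySem.List.pyRange 1 (limit + 1) 1).map PySem.Int.toStr
  let result := (PySem.List.pyRange 2 limit 3).foldl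
      (fun r i => PySem.List.pySetD r i "Multiple of 3") result
  PySem.Str.join "\n" result

-- ===== PRECONDITION & SPEC =====
def Spec_count_multiples_of_3 (limit : Int) (out : String) : Prop := out = count_multiples_of_3_alt limit
instance (limit : Int) (out : String) : Decidable (Spec_count_multiples_of_3 limit out) := by unfold Spec_count_multiples_of_3; infer_instance

-- ===== CLAIM (what is proved, stated in full; the proofs are below) =====
def Claim_equal_count_multiples_of_3 : Prop := ∀ (limit : Int), Dom_count_multiples_of_3 limit → Spec_count_multiples_of_3 limit (count_multiples_of_3 limit)

-- ===== LEMMAS AND PROOFS =====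

-- the per-element branch of A's loop, as a function of the value
def pvF (n : Int) : String :=
  if PySem.Int.mod n 3 = 0 then "Multiple of 3" else PySem.Int.toStr n

theorem pvA_loop_eq (limit num : Int) (acc : List String) :
    pvA_loop limit num acc = acc ++ (PySem.List.pyRange num (limit + 1) 1).map pvF := by
  induction num, acc using pvA_loop.induct limit with
  | case1 num acc h ih =>
    simp only [dite_eq_ite] at ih
    rw [pvA_loop, dif_pos h, ih,
      PySem.List.pyRange_one_cons (by omega : num < limit + 1)]
    simp [pvF, List.append_assoc]
  | case2 num acc h =>
    rw [pvA_loop, dif_neg h, PySem.List.pyRange_one_eq_nil (by omega)]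
    simp

theorem foldl_pySetD_getElem? (v : String) (idxs : List Int) (xs : List String)
    (h : ∀ i ∈ idxs, 0 ≤ i ∧ i < (xs.length : Int)) (j : Nat) :
    (idxs.foldl (fun r i => PySem.List.pySetD r i v) xs)[j]? =
      if (j : Int) ∈ idxs then some v else xs[j]? := by
  induction idxs generalizing xs with
  | nil => simp
  | cons i rest ih =>
    obtain ⟨hi0, hilt⟩ := h i (by simp)
    rw [List.foldl_cons, PySem.List.pySetD_of_nonneg _ _ hi0,
      ih _ (by intro a ha; have := h a (by simp [ha]); simpa [List.length_set] using this)]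
    by_cases hr : (j : Int) ∈ rest
    · simp [hr]
    · by_cases hji : (j : Int) = i
      · have hjl : j < xs.length := by omega
        have : i.toNat = j := by omega
        simp [hji, this, List.getElem?_set_self hjl]
      · have : i.toNat ≠ j := by omega
        simp [hr, hji, List.getElem?_set_ne this]

theorem pvB_list_eq (limit : Int) :
    (PySem.List.pyRange 2 limit 3).foldl
        (fun r i => PySem.List.pySetD r i "Multiple of 3")
        ((PySem.List.pyRange 1 (limit + 1) 1).map PySem.Int.toStr) =
      (PySem.List.pyRange 1 (limit + 1) 1).map pvF := by
  have hlen : ((PySem.List.pyRange 1 (limit + 1) 1).map PySem.Int.toStr).length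
      = (limit : Int).toNat := by
    simp [PySem.List.length_pyRange_one]
  apply List.ext_getElem?
  intro j
  rw [foldl_pySetD_getElem?]
  · by_cases hj : j < (limit : Int).toNat
    · have hmem : (j : Int) ∈ PySem.List.pyRange 2 limit 3 ↔
          PySem.Int.mod (1 + (j : Int)) 3 = 0 := by
        rw [PySem.List.mem_pyRange_iff_of_pos (by norm_num)]
        have : (1 + (j : Int)).fmod 3 = (1 + (j : Int)) % 3 := by
          simp [Int.fmod_eq_emod]
        simp only [PySem.Int.mod, this]
        omega
      have hjr : j < (PySem.List.pyRange 1 (limit + 1) 1).length := by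
        simp [PySem.List.length_pyRange_one]; omega
      rw [List.getElem?_map, List.getElem?_map,
        List.getElem?_eq_getElem hjr, PySem.List.getElem_pyRange_one]
      simp only [Option.map_some]
      by_cases hm : PySem.Int.mod (1 + (j : Int)) 3 = 0
      · rw [if_pos (hmem.mpr hm)]; simp only [pvF]; rw [if_pos hm]
      · rw [if_neg (fun hc => hm (hmem.mp hc))]; simp only [pvF]; rw [if_neg hm]
    · have hnm : (j : Int) ∉ PySem.List.pyRange 2 limit 3 := by
        rw [PySem.List.mem_pyRange_iff_of_pos (by norm_num)]
        omega
      have h1 : ((PySem.List.pyRange 1 (limit + 1) 1).map PySem.Int.toStr)[j]? = none := by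
        rw [List.getElem?_eq_none_iff]
        simp [PySem.List.length_pyRange_one]; omega
      have h2 : ((PySem.List.pyRange 1 (limit + 1) 1).map pvF)[j]? = none := by
        rw [List.getElem?_eq_none_iff]
        simp [PySem.List.length_pyRange_one]; omega
      simp [hnm, h1, h2]
  · intro i hi
    rw [PySem.List.mem_pyRange_iff_of_pos (by norm_num)] at hi
    rw [hlen]
    omega

-- ===== VERDICT (by name: the statement is the Claim_ definition above) =====
theorem count_multiples_of_3_spec : Claim_equal_count_multiples_of_3 := by
  intro limit _
  show count_multiples_of_3 limit = count_multiples_of_3_alt limit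
  rw [count_multiples_of_3, count_multiples_of_3_alt, pvA_loop_eq, pvB_list_eq]
  rfl
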